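-- pv_equiv track=rewrite | github.com/OMEGA-Y/CodingTest-sol | data_structure_lecture/grammar_check(matching_bracket_2).py | check
-- ===== SOURCE A (Python) =====
-- def check(x):
--     stack = []
--     cnt = 0
--     flag = False
--     for i in x:
--         if flag and not i=='"':
--             continue
--
--         if i=='"' and cnt==0:
--             cnt = 1
--             flag = True
--         elif i=='"' and cnt==1:
--             cnt = 0
--             flag = False
--
--         elif i == '(':
--             stack.append(i)
--         elif i == '{':
--             stack.append(i)
--         elif i == '[':
--             stack.append(i)
--         elif i == ')':
--             if stack and stack[-1] == '(':
--                 stack.pop()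
--             else:
--                 return "Compile Error"
--         elif i == '}':
--             if stack and stack[-1] == '{':
--                 stack.pop()
--             else:
--                 return "Compile Error"
--         elif i == ']':
--             if stack and stack[-1] == '[':
--                 stack.pop()
--             else:
--                 return "Compile Error"
--     return "No Error"
-- ===== SOURCE B (Python) =====
-- def check(x):
--     # pass 1: drop everything inside double-quoted regions (and the quotes)
--     filtered = []
--     inside = False
--     for ch in x:
--         if ch == '"':
--             inside = not inside
--         elif not inside:
--             filtered.append(ch)
--     # pass 2: classic stack matcher (no end-of-input emptiness check,
--     # matching the original's behaviour on unclosed brackets)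
--     pairs = {')': '(', '}': '{', ']': '['}
--     stack = []
--     for ch in filtered:
--         if ch in '({[':
--             stack.append(ch)
--         elif ch in pairs:
--             if not stack or stack[-1] != pairs[ch]:
--                 return "Compile Error"
--             stack.pop()
--     return "No Error"
-- ===== Notes on version B (the rewrite author's own statement) =====
-- stated objective: simpler
-- what changed: Single fused loop with cnt/flag quote state replaced by two clean passes: first filter out quoted regions, then a classic stack matcher driven by a closer->opener table.
import Mathlib
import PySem

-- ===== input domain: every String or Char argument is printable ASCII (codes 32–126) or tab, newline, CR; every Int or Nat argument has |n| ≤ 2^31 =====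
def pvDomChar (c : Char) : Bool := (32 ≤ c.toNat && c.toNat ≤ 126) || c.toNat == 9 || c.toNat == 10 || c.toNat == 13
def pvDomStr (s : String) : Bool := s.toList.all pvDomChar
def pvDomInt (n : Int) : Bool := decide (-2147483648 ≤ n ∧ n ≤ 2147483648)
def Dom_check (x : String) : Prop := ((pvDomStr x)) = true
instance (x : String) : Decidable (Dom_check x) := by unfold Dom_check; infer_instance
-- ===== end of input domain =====

-- B replaces A's fused loop (quote state cnt/flag interleaved with bracket matching) by two
-- clean passes: filter out quoted regions, then a classic stack matcher (objective: simpler).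

-- ===== PORT A =====
-- literal transliteration of A's single loop; stack head = Python stack[-1],
-- 'if stack and stack[-1] == …' becomes a match on the list plus the equality test
def checkGo (xs : List Char) (stack : List Char) (cnt : Int) (flag : Bool) : String :=
  match xs with
  | [] => "No Error"
  | i :: rest =>
    if flag && !(i == '"') then checkGo rest stack cnt flag
    else if i == '"' && cnt == 0 then checkGo rest stack 1 true
    else if i == '"' && cnt == 1 then checkGo rest stack 0 false
    else if i == '(' then checkGo rest (i :: stack) cnt flag
    else if i == '{' then checkGo rest (i :: stack) cnt flag
    else if i == '[' then checkGo rest (i :: stack) cnt flag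
    else if i == ')' then
      match stack with
      | top :: s => if top == '(' then checkGo rest s cnt flag else "Compile Error"
      | [] => "Compile Error"
    else if i == '}' then
      match stack with
      | top :: s => if top == '{' then checkGo rest s cnt flag else "Compile Error"
      | [] => "Compile Error"
    else if i == ']' then
      match stack with
      | top :: s => if top == '[' then checkGo rest s cnt flag else "Compile Error"
      | [] => "Compile Error"
    else checkGo rest stack cnt flag

def check (x : String) : String := checkGo x.toList [] 0 false

-- ===== PORT B =====
-- pass 1: drop quote characters and everything inside quoted regions
def filterQuotes (xs : List Char) (inside : Bool) : List Char :=
  match xs with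
  | [] => []
  | c :: rest =>
    if c == '"' then filterQuotes rest (!inside)
    else if inside then filterQuotes rest inside
    else c :: filterQuotes rest inside

-- closer -> opener table (Source B's `pairs` dict)
def pairOf (c : Char) : Char :=
  if c == ')' then '(' else if c == '}' then '{' else '['

-- pass 2: classic stack matcher; no emptiness check at the end
def matchGo (xs : List Char) (stack : List Char) : String :=
  match xs with
  | [] => "No Error"
  | c :: rest =>
    if c == '(' || c == '{' || c == '[' then matchGo rest (c :: stack)
    else if c == ')' || c == '}' || c == ']' then
      match stack with
      | t :: s => if t == pairOf c then matchGo rest s else "Compile Error"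
      | [] => "Compile Error"
    else matchGo rest stack

def check_alt (x : String) : String := matchGo (filterQuotes x.toList false) []

-- ===== PRECONDITION & SPEC =====
def Spec_check (x : String) (out : String) : Prop := out = check_alt x
instance (x : String) (out : String) : Decidable (Spec_check x out) := by unfold Spec_check; infer_instance

-- ===== CLAIM (what is proved, stated in full; the proofs are below) =====
def Claim_equal_check : Prop := ∀ (x : String), Dom_check x → Spec_check x (check x)

-- ===== LEMMAS AND PROOFS =====

theorem checkGo_eq (xs : List Char) : ∀ (stack : List Char) (inside : Bool),
    checkGo xs stack (if inside then 1 else 0) inside = matchGo (filterQuotes xs inside) stack := by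
  induction xs with
  | nil => intro stack inside; cases inside <;> simp [checkGo, filterQuotes, matchGo]
  | cons c rest ih =>
    intro stack inside
    by_cases hq : c = '"'
    · subst hq
      cases inside with
      | true => simp [checkGo, filterQuotes]; simpa using ih stack false
      | false => simp [checkGo, filterQuotes]; simpa using ih stack true
    · cases inside with
      | true =>
        simp [checkGo, filterQuotes, hq]
        simpa using ih stack true
      | false =>
        simp only [checkGo, filterQuotes, Bool.false_and, Bool.false_eq_true, if_false,
          beq_iff_eq, hq]
        by_cases h1 : c = '('
        · subst h1; simpa [matchGo] using ih ('(' :: stack) false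
        by_cases h2 : c = '{'
        · subst h2; simpa [matchGo] using ih ('{' :: stack) false
        by_cases h3 : c = '['
        · subst h3; simpa [matchGo] using ih ('[' :: stack) false
        by_cases h4 : c = ')'
        · subst h4
          simp only [h1, h2, h3, if_false, if_true, matchGo, beq_iff_eq, beq_self_eq_true]
          cases stack with
          | nil => simp
          | cons t s =>
            by_cases ht : t = '('
            · subst ht; simp [pairOf]; simpa using ih s false
            · simp [ht, pairOf]
        by_cases h5 : c = '}'
        · subst h5
          simp only [h1, h2, h3, h4, if_false, if_true, matchGo, beq_iff_eq, beq_self_eq_true]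
          cases stack with
          | nil => simp
          | cons t s =>
            by_cases ht : t = '{'
            · subst ht; simp [pairOf]; simpa using ih s false
            · simp [ht, pairOf]
        by_cases h6 : c = ']'
        · subst h6
          simp only [h1, h2, h3, h4, h5, if_false, if_true, matchGo, beq_iff_eq, beq_self_eq_true]
          cases stack with
          | nil => simp
          | cons t s =>
            by_cases ht : t = '['
            · subst ht; simp [pairOf]; simpa using ih s false
            · simp [ht, pairOf]
        · simp only [h1, h2, h3, h4, h5, h6, if_false, matchGo, beq_iff_eq]
          simpa [hq, h1, h2, h3, h4, h5, h6, matchGo] using ih stack false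

-- ===== VERDICT (by name: the statement is the Claim_ definition above) =====
theorem check_spec : Claim_equal_check := by
  intro x _
  unfold Spec_check check check_alt
  simpa using checkGo_eq x.toList [] false
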